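-- pv_equiv track=rewrite | github.com/barandaja/enterprise-app-template | shared/events/secure_event_bus.py | _match_permission
-- ===== SOURCE A (Python) =====
-- def _match_permission(pattern: str, permission: str) -> bool:
--     """Match permission pattern with wildcards"""
--     pattern_parts = pattern.split(":")
--     perm_parts = permission.split(":")
--
--     if len(pattern_parts) != len(perm_parts):
--         return False
--
--     for pat, perm in zip(pattern_parts, perm_parts):
--         if pat != "*" and pat != perm:
--             return False
--
--     return True
-- ===== SOURCE B (Python) =====
-- def _match_permission(pattern: str, permission: str) -> bool:
--     """Match permission pattern with wildcards by a single character-level scan: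
--     walk both strings in lockstep; at a segment boundary a pattern segment that is
--     exactly "*" skips one whole permission segment, otherwise characters must match."""
--     i, j = 0, 0
--     n, m = len(pattern), len(permission)
--     at_seg_start = True
--     while True:
--         if at_seg_start and i < n and pattern[i] == "*" and (i + 1 == n or pattern[i + 1] == ":"):
--             # wildcard segment: consume one whole permission segment
--             while j < m and permission[j] != ":":
--                 j += 1
--             if i + 1 == n:
--                 return j == m
--             if j == m:
--                 return False
--             i += 2
--             j += 1
--         elif i == n or j == m:
--             return i == n and j == m
--         elif pattern[i] != permission[j]:
--             return False
--         else:
--             at_seg_start = pattern[i] == ":"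
--             i += 1
--             j += 1
-- ===== Notes on version B (the rewrite author's own statement) =====
-- stated objective: alternative
-- what changed: B replaces A's split-into-segment-lists + length-check + zip loop by a single character-level lockstep scan of both strings, where a '*' pattern segment at a segment boundary skips one whole permission segment; no intermediate lists are built.
import Mathlib
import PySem

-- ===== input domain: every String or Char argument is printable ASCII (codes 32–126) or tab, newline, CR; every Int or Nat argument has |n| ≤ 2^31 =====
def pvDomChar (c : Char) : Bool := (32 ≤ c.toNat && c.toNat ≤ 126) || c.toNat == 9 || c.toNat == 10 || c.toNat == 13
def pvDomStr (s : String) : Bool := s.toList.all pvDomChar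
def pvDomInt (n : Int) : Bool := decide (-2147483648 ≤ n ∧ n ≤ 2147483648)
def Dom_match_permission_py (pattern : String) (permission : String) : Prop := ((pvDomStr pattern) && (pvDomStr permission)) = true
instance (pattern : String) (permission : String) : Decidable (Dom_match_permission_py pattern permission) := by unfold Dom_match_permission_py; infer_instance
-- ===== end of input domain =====

-- B replaces A's split+length-check+zip loop by a single character-level lockstep scan
-- (wildcard pattern segment "*" skips one whole permission segment); alternative, same cost.

-- ===== PORT A =====
-- the `for pat, perm in zip(...)` loop with its early `return False`
def loopA : List (List Char × List Char) → Bool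
  | [] => true
  | (pat, perm) :: rest => if pat != ['*'] && pat != perm then false else loopA rest

def match_permission_py (pattern : String) (permission : String) : Bool :=
  let pattern_parts := PySem.Chars.splitOn pattern.toList [':']   -- pattern.split(":")
  let perm_parts := PySem.Chars.splitOn permission.toList [':']   -- permission.split(":")
  if pattern_parts.length != perm_parts.length then false
  else loopA (pattern_parts.zip perm_parts)

-- ===== PORT B =====
-- inner `while j < m and permission[j] != ":"` loop: drop chars up to the next ':' (or all)
def skipSegB : List Char → List Char
  | [] => []
  | c :: rest => if c == ':' then c :: rest else skipSegB rest

-- the wildcard-head test of B's outer loop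
def wildHeadB (pat : List Char) : Bool :=
  pat.head? == some '*' && (pat.length == 1 || pat[1]? == some ':')

-- B's outer while loop; (i, j) become the remaining suffixes of pattern/permission
def goB (pat perm : List Char) (atSegStart : Bool) : Bool :=
  if atSegStart && wildHeadB pat then
    let perm' := skipSegB perm
    if pat.length == 1 then perm'.isEmpty
    else if perm'.isEmpty then false
    else goB (pat.drop 2) (perm'.drop 1) true
  else
    match pat, perm with
    | [], [] => true
    | [], _ :: _ => false
    | _ :: _, [] => false
    | c :: pt, d :: pm => if c != d then false else goB pt pm (c == ':')
termination_by pat.length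
decreasing_by
  · rename_i hw _ _
    rcases pat with _ | ⟨a, r⟩
    · simp [wildHeadB] at hw
    · simp
  · simp

def match_permission_py_alt (pattern : String) (permission : String) : Bool :=
  goB pattern.toList permission.toList true

-- ===== PRECONDITION & SPEC =====
def Spec_match_permission_py (pattern : String) (permission : String) (out : Bool) : Prop := out = match_permission_py_alt pattern permission
instance (pattern : String) (permission : String) (out : Bool) : Decidable (Spec_match_permission_py pattern permission out) := by unfold Spec_match_permission_py; infer_instance

-- ===== CLAIM (what is proved, stated in full; the proofs are below) =====
def Claim_equal_match_permission_py : Prop := ∀ (pattern : String) (permission : String), Dom_match_permission_py pattern permission → Spec_match_permission_py pattern permission (match_permission_py pattern permission)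

-- ===== LEMMAS AND PROOFS =====

-- reference splitter: Python's s.split(":") written as plain structural recursion
def mySplit : List Char → List (List Char)
  | [] => [[]]
  | c :: rest =>
    if c = ':' then [] :: mySplit rest
    else
      match mySplit rest with
      | [] => [[c]]
      | h :: t => (c :: h) :: t

def consFirst (x : List Char) : List (List Char) → List (List Char)
  | [] => [x]
  | h :: t => (x ++ h) :: t

-- segment-list matcher: the common semantics both ports are reduced to
def segMatch : List (List Char) → List (List Char) → Bool
  | [], [] => true
  | [], _ :: _ => false
  | _ :: _, [] => false
  | p :: ps, q :: qs => if p != ['*'] && p != q then false else segMatch ps qs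

def firstSeg : List Char → List Char
  | [] => []
  | c :: rest => if c = ':' then [] else c :: firstSeg rest

def tailSegs (cs : List Char) : List (List Char) :=
  match skipSegB cs with
  | [] => []
  | _ :: r => mySplit r

theorem mySplit_ne_nil (cs : List Char) : mySplit cs ≠ [] := by
  cases cs with
  | nil => simp [mySplit]
  | cons c rest =>
    simp only [mySplit]
    split
    · simp
    · split <;> simp

theorem consFirst_nil (ms : List (List Char)) (h : ms ≠ []) : consFirst [] ms = ms := by
  cases ms with
  | nil => simp at h
  | cons h t => simp [consFirst]

theorem go_spec (fuel : Nat) (l cur : List Char) (acc : List (List Char))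
    (h : l.length < fuel) :
    PySem.Chars.splitOn.go [':'] fuel l cur acc = acc.reverse ++ consFirst cur.reverse (mySplit l) := by
  induction fuel generalizing l cur acc with
  | zero => omega
  | succ fuel ih =>
    cases l with
    | nil =>
      rw [PySem.Chars.splitOn.go] <;> simp [mySplit, consFirst]
    | cons c rest =>
      rw [PySem.Chars.splitOn.go]
      simp only [List.length_cons] at h
      by_cases hc : c = ':'
      · have hp : [':'].isPrefixOf (c :: rest) = true := by simp [List.isPrefixOf, hc]
        rw [if_pos hp]
        simp only [List.length_singleton, List.drop_one, List.tail_cons]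
        rw [ih _ _ _ (by omega)]
        simp only [List.reverse_nil]
        rw [consFirst_nil _ (mySplit_ne_nil rest)]
        simp [mySplit, hc, consFirst]
      · have hp : [':'].isPrefixOf (c :: rest) = false := by
          simp [List.isPrefixOf]
          intro h; exact absurd h.symm hc
        rw [if_neg (by simp [hp])]
        rw [ih _ _ _ (by omega)]
        simp only [mySplit, if_neg hc]
        rcases hms : mySplit rest with _ | ⟨mh, mt⟩
        · exact absurd hms (mySplit_ne_nil rest)
        · simp [consFirst]

theorem splitOn_colon (cs : List Char) : PySem.Chars.splitOn cs [':'] = mySplit cs := by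
  show PySem.Chars.splitOn.go [':'] (cs.length + 1) cs [] [] = _
  rw [go_spec _ _ _ _ (by omega)]
  simp [consFirst_nil _ (mySplit_ne_nil cs)]

theorem loopA_zip (pp qq : List (List Char)) (h : pp.length = qq.length) :
    loopA (pp.zip qq) = segMatch pp qq := by
  induction pp generalizing qq with
  | nil =>
    cases qq with
    | nil => simp [loopA, segMatch]
    | cons q qs => simp at h
  | cons p ps ih =>
    cases qq with
    | nil => simp at h
    | cons q qs =>
      simp only [List.length_cons, Nat.add_right_cancel_iff] at h
      simp only [List.zip_cons_cons, loopA, segMatch]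
      rw [ih _ h]

theorem segMatch_len (pp qq : List (List Char)) (h : pp.length ≠ qq.length) :
    segMatch pp qq = false := by
  induction pp generalizing qq with
  | nil => cases qq with
    | nil => simp at h
    | cons q qs => simp [segMatch]
  | cons p ps ih =>
    cases qq with
    | nil => simp [segMatch]
    | cons q qs =>
      simp only [List.length_cons, ne_eq, Nat.add_right_cancel_iff] at h
      simp only [segMatch]
      split
      · rfl
      · exact ih _ h

theorem mySplit_decomp (cs : List Char) : mySplit cs = firstSeg cs :: tailSegs cs := by
  induction cs with
  | nil => simp [mySplit, firstSeg, tailSegs, skipSegB]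
  | cons c rest ih =>
    by_cases hc : c = ':'
    · simp [mySplit, firstSeg, tailSegs, skipSegB, hc]
    · simp only [mySplit, firstSeg, tailSegs, skipSegB, if_neg hc,
        if_neg (show (c == ':') ≠ true by simp [hc])]
      rw [ih]
      simp [tailSegs]

theorem skipSegB_cases (cs : List Char) : skipSegB cs = [] ∨ ∃ r, skipSegB cs = ':' :: r := by
  induction cs with
  | nil => simp [skipSegB]
  | cons c rest ih =>
    by_cases hc : c = ':'
    · right; exact ⟨rest, by simp [skipSegB, hc]⟩
    · simpa [skipSegB, hc] using ih

theorem firstSeg_star (pat : List Char) (h : firstSeg pat = ['*']) : wildHeadB pat = true := by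
  cases cs' : pat with
  | nil => simp [cs', firstSeg] at h
  | cons c rest =>
    subst cs'
    simp only [firstSeg] at h
    by_cases hc : c = ':'
    · simp [hc] at h
    · rw [if_neg hc] at h
      simp only [List.cons.injEq] at h
      obtain ⟨hc', hrest⟩ := h
      cases rest with
      | nil => simp [wildHeadB, hc']
      | cons d r =>
        simp only [firstSeg] at hrest
        by_cases hd : d = ':'
        · simp [wildHeadB, hc', hd]
        · rw [if_neg hd] at hrest; simp at hrest

theorem goB_not_wild (pat perm : List Char) (s : Bool) (h : wildHeadB pat = false) :
    goB pat perm s = goB pat perm false := by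
  rw [goB.eq_def, goB.eq_def]
  simp [h]

theorem segMatch_nil_left (ms : List (List Char)) (h : ms ≠ []) : segMatch [] ms = false := by
  cases ms with
  | nil => simp at h
  | cons a b => simp [segMatch]

theorem segMatch_nil_right (ms : List (List Char)) (h : ms ≠ []) : segMatch ms [] = false := by
  cases ms with
  | nil => simp at h
  | cons a b => simp [segMatch]

theorem tailSegs_cons (c : Char) (pt : List Char) (hc : c ≠ ':') : tailSegs (c :: pt) = tailSegs pt := by
  simp [tailSegs, skipSegB, hc]

theorem wildHead_shape (pat : List Char) (h : wildHeadB pat = true) :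
    pat = ['*'] ∨ ∃ r, pat = '*' :: ':' :: r := by
  cases pat with
  | nil => simp [wildHeadB] at h
  | cons c rest =>
    cases rest with
    | nil => left; simp [wildHeadB] at h; simp [h]
    | cons d r =>
      right
      simp [wildHeadB] at h
      exact ⟨r, by simp [h.1, h.2]⟩

theorem goB_both : ∀ (n : Nat) (pat : List Char), pat.length < n → ∀ (perm : List Char),
    goB pat perm false = ((firstSeg pat == firstSeg perm) && segMatch (tailSegs pat) (tailSegs perm)) ∧
    goB pat perm true = segMatch (mySplit pat) (mySplit perm) := by
  intro n
  induction n with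
  | zero => intro pat h; omega
  | succ n ih =>
    intro pat hlen perm
    have hF : goB pat perm false = ((firstSeg pat == firstSeg perm) && segMatch (tailSegs pat) (tailSegs perm)) := by
      rcases pat with _ | ⟨c, pt⟩
      · rcases perm with _ | ⟨d, pm⟩
        · simp [goB.eq_def, wildHeadB, firstSeg, tailSegs, skipSegB, segMatch]
        · have h0 : goB [] (d :: pm) false = false := by rw [goB.eq_def]; simp [wildHeadB]
          rw [h0]
          by_cases hd : d = ':'
          · subst hd
            simp [firstSeg, tailSegs, skipSegB, segMatch_nil_left _ (mySplit_ne_nil pm)]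
          · simp [firstSeg, tailSegs, skipSegB, hd]
      · rcases perm with _ | ⟨d, pm⟩
        · have h0 : goB (c :: pt) [] false = false := by rw [goB.eq_def]; simp
          rw [h0]
          by_cases hc : c = ':'
          · subst hc
            simp [firstSeg, tailSegs, skipSegB, segMatch_nil_right _ (mySplit_ne_nil pt)]
          · simp [firstSeg, hc]
        · have hstep : goB (c :: pt) (d :: pm) false = if c != d then false else goB pt pm (c == ':') := by
            rw [goB.eq_def]; simp
          by_cases hcd : c = d
          · subst hcd
            rw [hstep, if_neg (by simp)]
            have hlt : pt.length < n := by simp at hlen; omega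
            by_cases hc : c = ':'
            · subst hc
              rw [show (':' == ':') = true from by simp, (ih pt hlt pm).2]
              simp [firstSeg, tailSegs, skipSegB]
            · rw [show (c == ':') = false from by simp [hc], (ih pt hlt pm).1]
              simp [firstSeg, hc, tailSegs_cons _ _ hc]
          · rw [hstep, if_pos (by simp [hcd])]
            by_cases hc : c = ':' <;> by_cases hd : d = ':'
            · exact absurd (hc.trans hd.symm) hcd
            · subst hc; simp [firstSeg, hd]
            · subst hd; simp [firstSeg, hc]
            · simp [firstSeg, hc, hd, hcd]
    refine ⟨hF, ?_⟩
    by_cases hw : wildHeadB pat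
    · rcases wildHead_shape pat hw with h1 | ⟨r2, h2⟩
      · subst h1
        have hstep : goB ['*'] perm true = (skipSegB perm).isEmpty := by
          rw [goB.eq_def]; simp [hw]
        have hms : mySplit ['*'] = [['*']] := by simp [mySplit]
        rw [hstep, hms, mySplit_decomp perm]
        rcases skipSegB_cases perm with he | ⟨r, he⟩
        · simp [he, tailSegs, segMatch]
        · simp [he, tailSegs, segMatch, segMatch_nil_left _ (mySplit_ne_nil r)]
      · subst h2
        have hstep : goB ('*' :: ':' :: r2) perm true =
            (if (skipSegB perm).isEmpty then false else goB r2 ((skipSegB perm).drop 1) true) := by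
          rw [goB.eq_def]; simp [hw]
        have hms : mySplit ('*' :: ':' :: r2) = ['*'] :: mySplit r2 := by simp [mySplit]
        rw [hstep, hms, mySplit_decomp perm]
        have hlt : r2.length < n := by simp at hlen; omega
        rcases skipSegB_cases perm with he | ⟨r, he⟩
        · simp [he, tailSegs, segMatch, segMatch_nil_right _ (mySplit_ne_nil r2)]
        · rw [if_neg (by simp [he])]
          rw [he, List.drop_one, List.tail_cons, (ih r2 hlt r).2]
          simp [tailSegs, he, segMatch]
    · rw [goB_not_wild _ _ _ (by simpa using hw), hF, mySplit_decomp pat, mySplit_decomp perm]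
      have hf : firstSeg pat ≠ ['*'] := fun h => by simp [firstSeg_star pat h] at hw
      by_cases hfe : firstSeg pat = firstSeg perm
      · simp [hfe, segMatch]
      · simp [hfe, segMatch, hf]

theorem goB_main (pat perm : List Char) :
    goB pat perm true = segMatch (mySplit pat) (mySplit perm) :=
  (goB_both (pat.length + 1) pat (by omega) perm).2

-- ===== VERDICT (by name: the statement is the Claim_ definition above) =====
theorem match_permission_py_spec : Claim_equal_match_permission_py := by
  intro pattern permission _
  unfold Spec_match_permission_py match_permission_py match_permission_py_alt
  rw [splitOn_colon, splitOn_colon, goB_main]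
  by_cases h : (mySplit pattern.toList).length = (mySplit permission.toList).length
  · simp [h, loopA_zip _ _ h]
  · simp [h, segMatch_len _ _ h]
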